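-- pv_equiv track=rewrite | github.com/walkccc/LeetCode | solutions/3555. Smallest Subarray to Sort in Every Sliding Window/3555.py | minSubarraySort
-- ===== SOURCE A (Python) =====
-- def minSubarraySort(nums: list[int], k):
--   ans = []
--
--   for i in range(len(nums) - k + 1):
--     window = nums[i:i+k]
--     sortedWindow = sorted(window)
--     l = 0
--     r = k - 1
--     while l < k and window[l] == sortedWindow[l]:
--       l += 1
--     while r >= 0 and window[r] == sortedWindow[r]:
--       r -= 1
--     ans.append(0 if l > r else r - l + 1)
--
--   return ans
-- ===== SOURCE B (Python) =====
-- def minSubarraySort(nums, k):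
--   ans = []
--   for i in range(len(nums) - k + 1):
--     w = nums[i:i+k]
--     r = -1
--     l = k
--     if k > 0:
--       # forward scan: r = last index whose value is below the running max
--       mx = w[0]
--       j = 1
--       for x in w[1:]:
--         if x < mx:
--           r = j
--         else:
--           mx = x
--         j += 1
--       # backward scan: l = first index whose value is above the running min
--       mn = w[k-1]
--       j = k - 2
--       for x in reversed(w[:k-1]):
--         if x > mn:
--           l = j
--         else:
--           mn = x
--         j -= 1
--     ans.append(0 if r == -1 else r - l + 1)
--   return ans
-- ===== Notes on version B (the rewrite author's own statement) =====
-- stated objective: alternative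
-- what changed: Instead of sorting every window and comparing it index-by-index against the sorted copy, B finds the shortest unsorted span of each window without sorting: one forward scan with a running maximum (last index below the prefix max) and one backward scan with a running minimum (first index above the suffix min).
import Mathlib
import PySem

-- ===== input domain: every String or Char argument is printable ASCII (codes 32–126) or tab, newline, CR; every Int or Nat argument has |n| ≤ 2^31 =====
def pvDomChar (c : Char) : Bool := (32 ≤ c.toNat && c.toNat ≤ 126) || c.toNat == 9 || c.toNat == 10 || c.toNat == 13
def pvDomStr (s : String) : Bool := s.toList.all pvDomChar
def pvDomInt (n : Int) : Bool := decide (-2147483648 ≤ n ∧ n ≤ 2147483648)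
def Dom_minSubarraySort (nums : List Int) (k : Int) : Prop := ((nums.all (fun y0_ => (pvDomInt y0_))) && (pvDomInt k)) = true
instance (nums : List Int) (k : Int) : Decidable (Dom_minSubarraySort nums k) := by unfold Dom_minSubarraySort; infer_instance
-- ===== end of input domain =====

-- B replaces A's per-window sort-and-compare by forward-max / backward-min scans of each
-- window (no sorting at all); proved to return exactly A's output on every input.


-- ===== PORT A =====
def pvWhileL (w s : List Int) (k : Int) : Nat → Int → Int
  | 0, l => l
  | fuel+1, l =>
    -- while l < k and window[l] == sortedWindow[l]; the index is always in range
    -- when the guard holds, so pyGetD is exact here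
    if l < k ∧ PySem.List.pyGetD w l 0 = PySem.List.pyGetD s l 0 then
      pvWhileL w s k fuel (l + 1)
    else l

def pvWhileR (w s : List Int) : Nat → Int → Int
  | 0, r => r
  | fuel+1, r =>
    -- while r >= 0 and window[r] == sortedWindow[r]
    if 0 ≤ r ∧ PySem.List.pyGetD w r 0 = PySem.List.pyGetD s r 0 then
      pvWhileR w s fuel (r - 1)
    else r

def minSubarraySort (nums : List Int) (k : Int) : List Int :=
  (PySem.List.pyRange 0 (PySem.List.len nums - k + 1) 1).foldl (fun ans i =>
    let window := PySem.List.slice nums (some i) (some (i + k))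
    let sortedWindow := PySem.List.sorted window (fun x => x) false
    let l := pvWhileL window sortedWindow k (k.toNat + 1) 0
    let r := pvWhileR window sortedWindow (k.toNat + 1) (k - 1)
    ans ++ [if l > r then 0 else r - l + 1]) []

-- ===== PORT B =====
-- forward pass of B: x runs over w[1:], state (mx, j); returns the final r
def pvScanF : List Int → Int → Int → Int → Int
  | [], _, _, r => r
  | x :: rest, mx, j, r =>
    if x < mx then pvScanF rest mx (j + 1) j
    else pvScanF rest x (j + 1) r

-- backward pass of B: x runs over reversed(w[:k-1]), state (mn, j); returns the final l
def pvScanB : List Int → Int → Int → Int → Int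
  | [], _, _, l => l
  | x :: rest, mn, j, l =>
    if x > mn then pvScanB rest mn (j - 1) j
    else pvScanB rest x (j - 1) l

def minSubarraySort_alt (nums : List Int) (k : Int) : List Int :=
  (PySem.List.pyRange 0 (PySem.List.len nums - k + 1) 1).foldl (fun ans i =>
    let w := PySem.List.slice nums (some i) (some (i + k))
    let res :=
      if k > 0 then
        -- w[1:] is w.tail, w[0] and w[k-1] are in range since the window has length k
        let r := pvScanF w.tail (PySem.List.pyGetD w 0 0) 1 (-1)
        let l := pvScanB (PySem.List.slice w none (some (k - 1))).reverse
                   (PySem.List.pyGetD w (k - 1) 0) (k - 2) k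
        if r = -1 then 0 else r - l + 1
      else 0
    ans ++ [res]) []

-- ===== PRECONDITION & SPEC =====
def Spec_minSubarraySort (nums : List Int) (k : Int) (out : List Int) : Prop := out = minSubarraySort_alt nums k
instance (nums : List Int) (k : Int) (out : List Int) : Decidable (Spec_minSubarraySort nums k out) := by unfold Spec_minSubarraySort; infer_instance

-- ===== CLAIM (what is proved, stated in full; the proofs are below) =====
def Claim_equal_minSubarraySort : Prop := ∀ (nums : List Int) (k : Int), Dom_minSubarraySort nums k → Spec_minSubarraySort nums k (minSubarraySort nums k)

-- ===== LEMMAS AND PROOFS =====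

-- ===== proof-side definitions =====

/-- the sorted copy A builds of each window -/
def pvSorted (w : List Int) : List Int := PySem.List.sorted w (fun x => x) false

/-- length of the longest common prefix of two lists -/
def pvCpl : List Int → List Int → Nat
  | a :: as, b :: bs => if a = b then pvCpl as bs + 1 else 0
  | _, _ => 0

/-- length of the longest common suffix -/
def pvCsl (w s : List Int) : Nat := pvCpl w.reverse s.reverse

/-- position j carries a strictly larger element somewhere before it -/
def pvBadAt (w : List Int) (j : Nat) : Prop := ∃ i : Nat, i < j ∧ w.getD j 0 < w.getD i 0

def pvNoBadFrom (w : List Int) (t : Nat) : Prop := ∀ j : Nat, t ≤ j → j < w.length → ¬ pvBadAt w j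

-- ===== basic lemmas =====

theorem pvSorted_perm (w : List Int) : (pvSorted w).Perm w := PySem.List.sorted_perm ..

theorem pvSorted_pairwise (w : List Int) : (pvSorted w).Pairwise (· ≤ ·) := by
  have := PySem.List.sorted_pairwise (xs := w) (key := fun x : Int => x)
  simpa [pvSorted] using this

theorem pvSorted_length (w : List Int) : (pvSorted w).length = w.length :=
  (pvSorted_perm w).length_eq

theorem pvSorted_unique (w t : List Int) (hp : t.Perm w) (hs : t.Pairwise (· ≤ ·)) :
    t = pvSorted w :=
  PySem.List.eq_of_perm_of_pairwise_le (hp.trans (pvSorted_perm w).symm) hs (pvSorted_pairwise w)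

theorem pvCpl_le_left (a b : List Int) : pvCpl a b ≤ a.length := by
  induction a generalizing b with
  | nil => simp [pvCpl]
  | cons x as ih =>
    cases b with
    | nil => simp [pvCpl]
    | cons y bs => simp only [pvCpl]; split <;> simp [Nat.succ_le_succ (ih bs)]

theorem pvCpl_take (a b : List Int) : a.take (pvCpl a b) = b.take (pvCpl a b) := by
  induction a generalizing b with
  | nil => simp [pvCpl]
  | cons x as ih =>
    cases b with
    | nil => simp [pvCpl]
    | cons y bs =>
      simp only [pvCpl]; split
      · next h => simp [h, ih bs]
      · simp

theorem pvCpl_ne (a b : List Int) (h1 : pvCpl a b < a.length) (h2 : pvCpl a b < b.length) :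
    a[pvCpl a b]'h1 ≠ b[pvCpl a b]'h2 := by
  induction a generalizing b with
  | nil => simp at h1
  | cons x as ih =>
    cases b with
    | nil => simp at h2
    | cons y bs =>
      by_cases h : x = y
      · simp only [pvCpl, h, if_true] at h1 h2 ⊢
        simpa using ih bs (by simpa using h1) (by simpa using h2)
      · simpa [pvCpl, h] using h

theorem pvCpl_refl (a : List Int) : pvCpl a a = a.length := by
  induction a with
  | nil => simp [pvCpl]
  | cons x as ih => simp [pvCpl, ih]

theorem pvCpl_map_neg (a b : List Int) :
    pvCpl (a.map (fun x => -x)) (b.map (fun x => -x)) = pvCpl a b := by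
  induction a generalizing b with
  | nil => simp [pvCpl]
  | cons x as ih =>
    cases b with
    | nil => simp [pvCpl]
    | cons y bs => simp [pvCpl, ih bs, neg_inj]

-- ===== the sorted-suffix characterisation =====

theorem pvKey_rev (u v : List Int) (hv : v.Pairwise (· ≤ ·))
    (huv : ∀ x ∈ u, ∀ y ∈ v, x ≤ y) : pvSorted (u ++ v) = pvSorted u ++ v := by
  refine (pvSorted_unique (u ++ v) (pvSorted u ++ v) ?_ ?_).symm
  · exact (pvSorted_perm u).append_right v
  · refine List.pairwise_append.mpr ⟨pvSorted_pairwise u, hv, ?_⟩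
    intro x hx y hy
    exact huv x ((pvSorted_perm u).mem_iff.mp hx) y hy

theorem pvKey_fwd (u v : List Int) (h : (pvSorted (u ++ v)).drop u.length = v) :
    v.Pairwise (· ≤ ·) ∧ ∀ x ∈ u, ∀ y ∈ v, x ≤ y := by
  have hs : pvSorted (u ++ v) = (pvSorted (u ++ v)).take u.length ++ v := by
    conv_lhs => rw [← List.take_append_drop u.length (pvSorted (u ++ v))]
    rw [h]
  have hpw : ((pvSorted (u ++ v)).take u.length ++ v).Pairwise (· ≤ ·) := by
    rw [← hs]; exact pvSorted_pairwise _
  have hsplit := List.pairwise_append.mp hpw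
  refine ⟨hsplit.2.1, ?_⟩
  have hperm : ((pvSorted (u ++ v)).take u.length ++ v).Perm (u ++ v) := by
    rw [← hs]; exact pvSorted_perm _
  have htu : ((pvSorted (u ++ v)).take u.length).Perm u :=
    (List.perm_append_right_iff v).mp hperm
  intro x hx y hy
  exact hsplit.2.2 x (htu.mem_iff.mpr hx) y hy

theorem pvNotBadAt_le (w : List Int) (j : Nat) (hj : j < w.length) (h : ¬ pvBadAt w j)
    (i : Nat) (hij : i < j) : w[i]'(by omega) ≤ w[j]'hj := by
  by_contra hc
  exact h ⟨i, hij, by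
    rw [List.getD_eq_getElem w 0 hj, List.getD_eq_getElem w 0 (by omega : i < w.length)]
    omega⟩

theorem pvNba_iff (w : List Int) (t : Nat) (ht : t ≤ w.length) :
    pvNoBadFrom w t ↔ (pvSorted w).drop t = w.drop t := by
  have hw : w = w.take t ++ w.drop t := (List.take_append_drop t w).symm
  have hlu : (w.take t).length = t := by simp [ht]
  constructor
  · intro hnb
    have hv : (w.drop t).Pairwise (· ≤ ·) := by
      rw [List.pairwise_iff_getElem]
      intro i j hi hj hij
      have hj' : t + j < w.length := by simp at hj; omega
      simp only [List.getElem_drop]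
      exact pvNotBadAt_le w (t + j) hj' (hnb (t + j) (by omega) hj') (t + i) (by omega)
    have huv : ∀ x ∈ w.take t, ∀ y ∈ w.drop t, x ≤ y := by
      intro x hx y hy
      obtain ⟨i, hi, hxi⟩ := List.mem_iff_getElem.mp hx
      obtain ⟨j, hj, hyj⟩ := List.mem_iff_getElem.mp hy
      have hi' : i < t := by omega
      have hj' : t + j < w.length := by simp at hj; omega
      rw [← hxi, ← hyj]
      simp only [List.getElem_take, List.getElem_drop]
      exact pvNotBadAt_le w (t + j) hj' (hnb (t + j) (by omega) hj') i (by omega)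
    have hk : pvSorted (w.take t ++ w.drop t) = pvSorted (w.take t) ++ w.drop t :=
      pvKey_rev _ _ hv huv
    rw [← hw] at hk
    rw [hk]
    have : (pvSorted (w.take t)).length = t := by rw [pvSorted_length, hlu]
    rw [List.drop_append_of_le_length (by omega)]
    simp [List.drop_eq_nil_of_le this.le]
  · intro h
    have h' : (pvSorted (w.take t ++ w.drop t)).drop (w.take t).length = w.drop t := by
      rw [← hw, hlu]; exact h
    obtain ⟨hv, huv⟩ := pvKey_fwd _ _ h'
    intro j hjt hj hbad
    obtain ⟨i, hij, hlt⟩ := hbad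
    rw [List.getD_eq_getElem w 0 hj, List.getD_eq_getElem w 0 (by omega : i < w.length)] at hlt
    by_cases hit : i < t
    · have hx : w[i]'(by omega) ∈ w.take t := by
        rw [List.mem_iff_getElem]
        exact ⟨i, by omega, by simp [List.getElem_take]⟩
      have hy : w[j]'hj ∈ w.drop t := by
        rw [List.mem_iff_getElem]
        refine ⟨j - t, by simp; omega, ?_⟩
        simp only [List.getElem_drop]
        congr 1; omega
      exact absurd (huv _ hx _ hy) (by omega)
    · rw [List.pairwise_iff_getElem] at hv
      have := hv (i - t) (j - t) (by simp; omega) (by simp; omega) (by omega)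
      simp only [List.getElem_drop] at this
      have hi2 : t + (i - t) = i := by omega
      have hj2 : t + (j - t) = j := by omega
      simp only [hi2, hj2] at this
      omega

-- ===== common-suffix facts =====

theorem pvCsl_le (w s : List Int) : pvCsl w s ≤ w.length := by
  simpa using pvCpl_le_left w.reverse s.reverse

theorem pvSuffix_eq (w s : List Int) (hs : s.length = w.length) :
    w.drop (w.length - pvCsl w s) = s.drop (w.length - pvCsl w s) := by
  have h := pvCpl_take w.reverse s.reverse
  rw [List.take_reverse, List.take_reverse] at h
  have := congrArg List.reverse h
  simpa [pvCsl, hs] using this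

theorem pvSuffix_ne (w s : List Int) (hs : s.length = w.length) (hm : pvCsl w s < w.length) :
    w[w.length - pvCsl w s - 1]'(by omega) ≠ s[w.length - pvCsl w s - 1]'(by omega) := by
  have h := pvCpl_ne w.reverse s.reverse (by simpa using hm)
      (by simp only [List.length_reverse, hs]; simpa [pvCsl] using hm)
  rw [List.getElem_reverse, List.getElem_reverse] at h
  simp only [pvCsl] at hm ⊢
  have e1 : w.length - 1 - pvCpl w.reverse s.reverse = w.length - pvCpl w.reverse s.reverse - 1 := by
    omega
  have e2 : s.length - 1 - pvCpl w.reverse s.reverse = w.length - pvCpl w.reverse s.reverse - 1 := by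
    omega
  simp only [e1, e2] at h
  exact h

-- ===== the forward scan computes the last bad position =====

def pvInvR (w : List Int) (q : Nat) (r : Int) : Prop :=
  (r = -1 ∨ ∃ jn : Nat, r = (jn : Int) ∧ 1 ≤ jn ∧ jn < q ∧ pvBadAt w jn) ∧
  (∀ j : Nat, r < (j : Int) → j < q → ¬ pvBadAt w j)

theorem pvScanF_inv (w : List Int) : ∀ (rest : List Int) (p : Nat) (mx r : Int),
    w.drop p = rest → 1 ≤ p → p ≤ w.length →
    (∀ i : Nat, i < p → w.getD i 0 ≤ mx) → (∃ i : Nat, i < p ∧ w.getD i 0 = mx) →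
    pvInvR w p r → pvInvR w w.length (pvScanF rest mx (p : Int) r) := by
  intro rest
  induction rest with
  | nil =>
    intro p mx r hdrop _ hple _ _ hinv
    have : p = w.length := by
      have := List.drop_eq_nil_iff.mp hdrop
      omega
    simpa [pvScanF, this] using hinv
  | cons x rest' ih =>
    intro p mx r hdrop hp1 hple hmx hmx2 hinv
    have hplt : p < w.length := by
      by_contra hc
      rw [List.drop_eq_nil_of_le (by omega)] at hdrop
      simp at hdrop
    have hx : w[p]'hplt = x := by
      have : (w.drop p)[0]'(by rw [hdrop]; simp) = x := by simp [hdrop]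
      simpa using this
    have hxD : w.getD p 0 = x := by rw [List.getD_eq_getElem w 0 hplt, hx]
    have hdrop' : w.drop (p + 1) = rest' := by
      rw [← List.tail_drop, hdrop]; rfl
    have hcast : (p : Int) + 1 = ((p + 1 : Nat) : Int) := by push_cast; ring
    by_cases hlt : x < mx
    · simp only [pvScanF, if_pos hlt, hcast]
      apply ih (p + 1) mx (p : Int) hdrop' (by omega) (by omega)
      · intro i hi
        rcases Nat.lt_succ_iff_lt_or_eq.mp hi with h | h
        · exact hmx i h
        · rw [h, hxD]; omega
      · obtain ⟨i, hi, hie⟩ := hmx2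
        exact ⟨i, by omega, hie⟩
      · constructor
        · right
          refine ⟨p, rfl, by omega, by omega, ?_⟩
          obtain ⟨i, hi, hie⟩ := hmx2
          exact ⟨i, hi, by rw [hxD, hie]; omega⟩
        · intro j hj1 hj2
          have hpj : p < j := by exact_mod_cast hj1
          exact absurd hj2 (by omega)
    · simp only [pvScanF, if_neg hlt, hcast]
      apply ih (p + 1) x r hdrop' (by omega) (by omega)
      · intro i hi
        rcases Nat.lt_succ_iff_lt_or_eq.mp hi with h | h
        · exact (hmx i h).trans (by omega)
        · rw [h, hxD]
      · exact ⟨p, by omega, hxD⟩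
      · constructor
        · rcases hinv.1 with h | ⟨jn, hje, hj1, hj2, hb⟩
          · exact Or.inl h
          · exact Or.inr ⟨jn, hje, hj1, by omega, hb⟩
        · intro j hj1 hj2
          rcases Nat.lt_succ_iff_lt_or_eq.mp hj2 with h | h
          · exact hinv.2 j hj1 h
          · subst h
            intro ⟨i, hi, hbad⟩
            have := hmx i hi
            rw [hxD] at hbad
            omega

theorem pvScanF_main (w : List Int) (hw : w ≠ []) :
    pvScanF w.tail (w.getD 0 0) 1 (-1)
      = (w.length : Int) - 1 - (pvCsl w (pvSorted w) : Int) := by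
  have hn : 1 ≤ w.length := List.length_pos_iff.mpr hw
  set n := w.length with hndef
  set m := pvCsl w (pvSorted w) with hmdef
  have hmle : m ≤ n := pvCsl_le w (pvSorted w)
  have hs : (pvSorted w).length = n := pvSorted_length w
  -- the scan result satisfies the invariant
  have hinv : pvInvR w n (pvScanF w.tail (w.getD 0 0) 1 (-1)) := by
    have h01 : ((1 : Nat) : Int) = (1 : Int) := rfl
    rw [← h01]
    apply pvScanF_inv w w.tail 1 (w.getD 0 0) (-1) (by rw [List.drop_one]) (le_refl 1) hn
    · intro i hi
      interval_cases i
      exact le_refl _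
    · exact ⟨0, by omega, rfl⟩
    · constructor
      · exact Or.inl rfl
      · intro j _ hj1
        interval_cases j
        rintro ⟨i, hi, _⟩
        omega
  -- no bad position in the matched suffix
  have hF1 : pvNoBadFrom w (n - m) := by
    rw [pvNba_iff w (n - m) (by omega)]
    have := pvSuffix_eq w (pvSorted w) hs
    rw [← hmdef] at this
    exact this.symm
  -- if the suffix is proper, position n - m - 1 is bad
  have hF2 : m < n → pvBadAt w (n - m - 1) := by
    intro hmn
    by_contra hnb
    have hnb' : pvNoBadFrom w (n - m - 1) := by
      intro j hj1 hj2
      rcases Nat.eq_or_lt_of_le hj1 with h | h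
      · rw [← h]; exact hnb
      · exact hF1 j (by omega) hj2
    rw [pvNba_iff w (n - m - 1) (by omega)] at hnb'
    have hne := pvSuffix_ne w (pvSorted w) hs (by rw [← hmdef]; exact hmn)
    simp only [← hmdef] at hne
    apply hne
    have h0 : w[n - m - 1]'(by omega) = (w.drop (n - m - 1))[0]'(by simp; omega) := by simp
    have h1 : (pvSorted w)[n - m - 1]'(by omega) =
        ((pvSorted w).drop (n - m - 1))[0]'(by simp [hs]; omega) := by simp
    rw [h0, h1]
    congr 1
    exact hnb'.symm
  -- identify the scan result
  obtain ⟨hdis, hno⟩ := hinv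
  rcases Nat.eq_or_lt_of_le hmle with hmn | hmn
  · -- fully sorted window: result is -1
    rcases hdis with h | ⟨jn, hje, _, hj2, hb⟩
    · rw [h, hmn]; push_cast; ring
    · exact absurd hb (hF1 jn (by omega) hj2)
  · -- result is n - m - 1
    have hbad := hF2 hmn
    have hRge : ¬ (pvScanF w.tail (w.getD 0 0) 1 (-1) < ((n - m - 1 : Nat) : Int)) := by
      intro hc
      exact hno (n - m - 1) hc (by omega) hbad
    rcases hdis with h | ⟨jn, hje, hj1, hj2, hb⟩
    · rw [h] at hRge
      exfalso; apply hRge; omega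
    · have hjle : jn ≤ n - m - 1 := by
        by_contra hc
        exact hF1 jn (by omega) hj2 hb
      rw [hje] at hRge ⊢
      have : jn = n - m - 1 := by
        by_contra hc
        apply hRge
        exact_mod_cast by omega
      rw [this]
      push_cast [Nat.cast_sub (by omega : m + 1 ≤ n)]
      omega

-- ===== A's while loops compute common prefix / suffix lengths =====

theorem pvWhileL_eq (w s : List Int) (hs : s.length = w.length) :
    ∀ (fuel l : Nat), w.length ≤ fuel + l →
      pvWhileL w s (w.length : Int) fuel (l : Int)
        = ((l + pvCpl (w.drop l) (s.drop l) : Nat) : Int) := by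
  intro fuel
  induction fuel with
  | zero =>
    intro l hl
    have h1 : w.drop l = [] := List.drop_eq_nil_of_le (by omega)
    simp [pvWhileL, h1, pvCpl]
  | succ fuel ih =>
    intro l hl
    by_cases hln : l < w.length
    · have hgw : PySem.List.pyGetD w (l : Int) 0 = w[l]'hln := by
        simp [PySem.List.pyGetD_natCast, List.getElem?_eq_getElem hln]
      have hgs : PySem.List.pyGetD s (l : Int) 0 = s[l]'(by omega) := by
        simp [PySem.List.pyGetD_natCast, List.getElem?_eq_getElem (by omega : l < s.length)]
      have hdw : w.drop l = w[l]'hln :: w.drop (l + 1) := List.drop_eq_getElem_cons hln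
      have hds : s.drop l = s[l]'(by omega) :: s.drop (l + 1) :=
        List.drop_eq_getElem_cons (by omega)
      by_cases heq : w[l]'hln = s[l]'(by omega)
      · rw [pvWhileL, if_pos ⟨by exact_mod_cast hln, by rw [hgw, hgs, heq]⟩]
        have hc : (l : Int) + 1 = ((l + 1 : Nat) : Int) := by push_cast; ring
        rw [hc, ih (l + 1) (by omega)]
        rw [hdw, hds]
        simp only [pvCpl, if_pos heq]
        push_cast; ring
      · rw [pvWhileL, if_neg]
        · rw [hdw, hds]
          simp only [pvCpl, if_neg heq]
          push_cast; ring
        · rintro ⟨-, hc⟩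
          rw [hgw, hgs] at hc
          exact heq hc
    · have h1 : w.drop l = [] := List.drop_eq_nil_of_le (by omega)
      rw [pvWhileL, if_neg]
      · simp [h1, pvCpl]
      · rintro ⟨hc, -⟩
        have : l < w.length := by exact_mod_cast hc
        omega

theorem pvWhileR_eq (w s : List Int) (hs : s.length = w.length) :
    ∀ (fuel t : Nat), t ≤ w.length → w.length ≤ fuel + t →
      pvWhileR w s fuel ((w.length : Int) - 1 - (t : Int))
        = (w.length : Int) - 1 - ((t + pvCpl (w.reverse.drop t) (s.reverse.drop t) : Nat) : Int) := by
  intro fuel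
  induction fuel with
  | zero =>
    intro t ht hl
    have ht' : t = w.length := by omega
    subst ht'
    have h1 : w.reverse.drop w.length = [] := List.drop_eq_nil_of_le (by simp)
    have h2 : s.reverse.drop w.length = [] := List.drop_eq_nil_of_le (by simp [hs])
    simp only [pvWhileR, h1, h2, pvCpl]
    push_cast; ring
  | succ fuel ih =>
    intro t ht hl
    by_cases htn : t < w.length
    · have hr : (w.length : Int) - 1 - (t : Int) = ((w.length - 1 - t : Nat) : Int) := by
        push_cast [Nat.cast_sub (by omega : 1 + t ≤ w.length)]; omega
      have hidx : w.length - 1 - t < w.length := by omega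
      have hidxs : w.length - 1 - t < s.length := by omega
      have hgw : PySem.List.pyGetD w ((w.length : Int) - 1 - (t : Int)) 0
          = w[w.length - 1 - t]'hidx := by
        rw [hr]
        simp [PySem.List.pyGetD_natCast, List.getElem?_eq_getElem hidx]
      have hgs : PySem.List.pyGetD s ((w.length : Int) - 1 - (t : Int)) 0
          = s[w.length - 1 - t]'hidxs := by
        rw [hr]
        simp [PySem.List.pyGetD_natCast, List.getElem?_eq_getElem hidxs]
      have hrevw : w.reverse[t]'(by simpa using htn) = w[w.length - 1 - t]'hidx :=
        List.getElem_reverse _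
      have hrevs : s.reverse[t]'(by simp; omega) = s[s.length - 1 - t]'(by omega) :=
        List.getElem_reverse _
      have hses : s[s.length - 1 - t]'(by omega) = s[w.length - 1 - t]'hidxs := by
        congr 1; omega
      have hdw : w.reverse.drop t = w.reverse[t]'(by simpa using htn) :: w.reverse.drop (t + 1) :=
        List.drop_eq_getElem_cons (by simpa using htn)
      have hds : s.reverse.drop t = s.reverse[t]'(by simp; omega) :: s.reverse.drop (t + 1) :=
        List.drop_eq_getElem_cons (by simp; omega)
      by_cases heq : w[w.length - 1 - t]'hidx = s[w.length - 1 - t]'hidxs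
      · rw [pvWhileR, if_pos ⟨by omega, by rw [hgw, hgs, heq]⟩]
        have hc : (w.length : Int) - 1 - (t : Int) - 1 = (w.length : Int) - 1 - ((t + 1 : Nat) : Int) := by
          push_cast; ring
        rw [hc, ih (t + 1) (by omega) (by omega)]
        rw [hdw, hds]
        simp only [pvCpl, hrevw, hrevs, hses, if_pos heq]
        push_cast; ring
      · rw [pvWhileR, if_neg]
        · rw [hdw, hds]
          simp only [pvCpl, hrevw, hrevs, hses, if_neg heq]
          push_cast; omega
        · rintro ⟨-, hc⟩
          rw [hgw, hgs] at hc
          exact heq hc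
    · have ht' : t = w.length := by omega
      subst ht'
      have h1 : w.reverse.drop w.length = [] := List.drop_eq_nil_of_le (by simp)
      have h2 : s.reverse.drop w.length = [] := List.drop_eq_nil_of_le (by simp [hs])
      rw [pvWhileR, if_neg]
      · simp only [h1, h2, pvCpl]
        push_cast; ring
      · rintro ⟨hc, -⟩
        omega

-- ===== the backward scan is the forward scan of the reversed, negated window =====

theorem pvScanB_eq_scanF (lst : List Int) : ∀ (mn j l c : Int),
    pvScanB lst mn j l = c - pvScanF (lst.map (fun x => -x)) (-mn) (c - j) (c - l) := by
  induction lst with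
  | nil => intro mn j l c; simp [pvScanB, pvScanF]
  | cons x rest ih =>
    intro mn j l c
    by_cases h : x > mn
    · rw [pvScanB, if_pos h]
      simp only [List.map_cons, pvScanF, if_pos (by omega : -x < -mn)]
      rw [ih]
      congr 1 <;> ring_nf
    · rw [pvScanB, if_neg h]
      simp only [List.map_cons, pvScanF, if_neg (by omega : ¬ -x < -mn)]
      rw [ih]
      congr 1 <;> ring_nf

theorem pvSorted_revneg (w : List Int) :
    pvSorted (w.reverse.map (fun x => -x)) = ((pvSorted w).reverse).map (fun x => -x) := by
  refine (pvSorted_unique _ _ ?_ ?_).symm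
  · refine List.Perm.map _ ?_
    exact ((pvSorted w).reverse_perm.trans (pvSorted_perm w)).trans w.reverse_perm.symm
  · rw [List.pairwise_map, List.pairwise_reverse]
    have := pvSorted_pairwise w
    exact this.imp (by intro a b h; omega)

-- ===== fully matched prefix and suffix force equality =====

theorem pvAgree_all (w s : List Int) (hs : s.length = w.length)
    (h : w.length ≤ pvCpl w s + pvCsl w s) : w = s := by
  apply List.ext_getElem hs.symm
  intro i hi his
  by_cases hc : i < pvCpl w s
  · have := pvCpl_take w s
    have h0 : (w.take (pvCpl w s))[i]'(by simp; omega) = (s.take (pvCpl w s))[i]'(by simp; omega) := by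
      simp only [this]
    simpa using h0
  · have hdrop := pvSuffix_eq w s hs
    have hix : w.length - pvCsl w s ≤ i := by omega
    have h0 : (w.drop (w.length - pvCsl w s))[i - (w.length - pvCsl w s)]'(by simp; omega)
        = (s.drop (w.length - pvCsl w s))[i - (w.length - pvCsl w s)]'(by simp; omega) := by
      simp only [hdrop]
    simp only [List.getElem_drop] at h0
    have he : w.length - pvCsl w s + (i - (w.length - pvCsl w s)) = i := by omega
    simpa only [he] using h0

theorem pvCsl_refl (w : List Int) : pvCsl w w = w.length := by
  simp [pvCsl, pvCpl_refl]

-- ===== per-window equality =====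

theorem pvWindow_eq (w : List Int) (k : Int) (hk : 0 < k) (hlen : w.length = k.toNat) :
    (if pvWhileL w (pvSorted w) k (k.toNat + 1) 0 > pvWhileR w (pvSorted w) (k.toNat + 1) (k - 1)
     then 0
     else pvWhileR w (pvSorted w) (k.toNat + 1) (k - 1)
          - pvWhileL w (pvSorted w) k (k.toNat + 1) 0 + 1)
    = (if pvScanF w.tail (PySem.List.pyGetD w 0 0) 1 (-1) = -1 then 0
       else pvScanF w.tail (PySem.List.pyGetD w 0 0) 1 (-1)
            - pvScanB (PySem.List.slice w none (some (k - 1))).reverse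
                (PySem.List.pyGetD w (k - 1) 0) (k - 2) k + 1) := by
  have hk' : k = (w.length : Int) := by rw [hlen]; omega
  subst hk'
  set n := w.length with hn
  have hn1 : 1 ≤ n := by omega
  have hwne : w ≠ [] := List.length_pos_iff.mp (by omega : 0 < w.length)
  set s := pvSorted w with hsdef
  have hslen : s.length = n := pvSorted_length w
  have htn : ((n : Int)).toNat = n := by omega
  -- A's left pointer
  have hlA : pvWhileL w s ((n : Int)) (((n : Int)).toNat + 1) 0 = ((pvCpl w s : Nat) : Int) := by
    have := pvWhileL_eq w s hslen (n + 1) 0 (by omega)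
    rw [htn]
    simpa using this
  -- A's right pointer
  have hrA : pvWhileR w s (((n : Int)).toNat + 1) ((n : Int) - 1)
      = (n : Int) - 1 - ((pvCsl w s : Nat) : Int) := by
    have := pvWhileR_eq w s hslen (n + 1) 0 (by omega) (by omega)
    rw [htn]
    simpa [pvCsl] using this
  -- B's r
  have hrB : pvScanF w.tail (PySem.List.pyGetD w 0 0) 1 (-1)
      = (n : Int) - 1 - ((pvCsl w s : Nat) : Int) := by
    rw [PySem.List.pyGetD_zero]
    exact pvScanF_main w hwne
  -- B's l
  have hlB : pvScanB ((PySem.List.slice w none (some ((n : Int) - 1))).reverse)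
        (PySem.List.pyGetD w ((n : Int) - 1) 0) ((n : Int) - 2) (n : Int)
      = ((pvCpl w s : Nat) : Int) := by
    have hsl : PySem.List.slice w none (some ((n : Int) - 1)) = w.take (n - 1) := by
      have hc : (n : Int) - 1 = ((n - 1 : Nat) : Int) := by omega
      rw [hc, PySem.List.slice_to_natCast]
    set w' : List Int := w.reverse.map (fun x => -x) with hw'
    have hidx : n - 1 < n := by omega
    have hgl : PySem.List.pyGetD w ((n : Int) - 1) 0 = w[n - 1]'hidx := by
      have hc : (n : Int) - 1 = ((n - 1 : Nat) : Int) := by omega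
      rw [hc]
      simp [PySem.List.pyGetD_natCast, List.getElem?_eq_getElem hidx]
    have htl : (w.take (n - 1)).reverse.map (fun x : Int => -x) = w'.tail := by
      rw [hw', ← List.map_tail, List.tail_reverse, List.dropLast_eq_take, ← hn]
    have hmx : -(w[n - 1]'hidx) = w'.getD 0 0 := by
      rw [List.getD_eq_getElem w' 0 (by simp [hw']; omega)]
      simp only [hw', List.getElem_map, List.getElem_reverse]
      have e : w.length - 1 - 0 = n - 1 := by omega
      simp only [e]
    have hw'ne : w' ≠ [] := by
      intro h
      rw [hw'] at h
      simp only [List.map_eq_nil_iff, List.reverse_eq_nil_iff] at h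
      exact hwne h
    have hmain := pvScanF_main w' hw'ne
    have hw'len : w'.length = n := by simp [hw']; omega
    have hcsl' : pvCsl w' (pvSorted w') = pvCpl w s := by
      have h1 : w'.reverse = w.map (fun x : Int => -x) := by
        rw [hw', ← List.map_reverse, List.reverse_reverse]
      have h2 : (pvSorted w').reverse = s.map (fun x : Int => -x) := by
        rw [hw', pvSorted_revneg, ← List.map_reverse, List.reverse_reverse, hsdef]
      rw [pvCsl, h1, h2, pvCpl_map_neg]
    rw [hsl, pvScanB_eq_scanF _ _ _ _ ((n : Int) - 1), hgl, htl, hmx]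
    have e1 : (n : Int) - 1 - ((n : Int) - 2) = 1 := by ring
    have e2 : (n : Int) - 1 - (n : Int) = -1 := by ring
    rw [e1, e2, hmain, hcsl', hw'len]
    have := pvCpl_le_left w s
    omega
  rw [hlA, hrA, hrB, hlB]
  have hcle : pvCpl w s ≤ n := pvCpl_le_left w s
  have hmle : pvCsl w s ≤ n := by
    have := pvCsl_le w s
    omega
  rcases Nat.eq_or_lt_of_le hmle with hmn | hmn
  · -- fully sorted window
    have hws : w = s := by
      have := pvSuffix_eq w s hslen
      rw [← hn, hmn] at this
      simpa using this
    have hcn : pvCpl w s = n := by rw [hws, pvCpl_refl, hslen]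
    rw [hcn, hmn]
    have hc1 : ((n : Int)) > (n : Int) - 1 - (n : Int) := by omega
    rw [if_pos hc1, if_pos (by omega)]
  · have hne : ¬ ((n : Int) - 1 - ((pvCsl w s : Nat) : Int) = -1) := by omega
    have hsum : pvCpl w s + pvCsl w s < n := by
      by_contra hc
      have hws : w = s := pvAgree_all w s hslen (by omega)
      have : pvCsl w s = n := by rw [hws, pvCsl_refl, hslen]
      omega
    have hcnd : ¬ (((pvCpl w s : Nat) : Int) > (n : Int) - 1 - ((pvCsl w s : Nat) : Int)) := by
      omega
    rw [if_neg hcnd, if_neg hne]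


-- ===== VERDICT (by name: the statement is the Claim_ definition above) =====
theorem minSubarraySort_spec : Claim_equal_minSubarraySort := by
  intro nums k _
  unfold Spec_minSubarraySort
  unfold minSubarraySort minSubarraySort_alt
  apply PySem.List.foldl_congr_mem
  intro acc i hi
  rw [PySem.List.mem_pyRange_one] at hi
  simp only [PySem.List.len_eq] at hi
  congr 1
  by_cases hk : 0 < k
  · -- the window has length k
    have hwl : (PySem.List.slice nums (some i) (some (i + k))).length = k.toNat := by
      rw [PySem.List.slice_toNat nums (by omega) (by omega)]
      simp only [List.length_take, List.length_drop]
      omega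
    simp only [gt_iff_lt]
    rw [if_pos hk]
    have hwin := pvWindow_eq (PySem.List.slice nums (some i) (some (i + k))) k hk hwl
    simpa [pvSorted] using hwin
  · -- k ≤ 0 : both sides produce 0
    have hkt : k.toNat = 0 := by omega
    have hL : pvWhileL (PySem.List.slice nums (some i) (some (i + k)))
        (PySem.List.sorted (PySem.List.slice nums (some i) (some (i + k))) (fun x => x) false)
        k (k.toNat + 1) 0 = 0 := by
      rw [hkt, pvWhileL, if_neg]
      rintro ⟨hc, -⟩
      omega
    have hR : pvWhileR (PySem.List.slice nums (some i) (some (i + k)))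
        (PySem.List.sorted (PySem.List.slice nums (some i) (some (i + k))) (fun x => x) false)
        (k.toNat + 1) (k - 1) = k - 1 := by
      rw [hkt, pvWhileR, if_neg]
      rintro ⟨hc, -⟩
      omega
    simp only [hL, hR, if_neg hk]
    rw [if_pos (by omega : (0 : Int) > k - 1)]
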